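-- pv_equiv track=rewrite | github.com/M-Polonczyk/gnn-nlp-vuln-detection | src/gnn_vuln_detection/code_representation/feature_extractor.py | _has_operators
-- ===== SOURCE A (Python) =====
-- def _has_operators(text: str) -> bool:
--     """Check if text contains operators"""
--     operators = {
--         "+",
--         "-",
--         "*",
--         "/",
--         "%",
--         "=",
--         "==",
--         "!=",
--         "<",
--         ">",
--         "<=",
--         ">=",
--         "&&",
--         "||",
--         "!",
--         "&",
--         "|",
--         "^",
--         "~",
--         "<<",
--         ">>",
--         "++",
--         "--",
--         "+=",
--         "-=",
--         "*=",
--         "/=",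
--     }
--     return any(op in text for op in operators)
-- ===== SOURCE B (Python) =====
-- def _has_operators(text: str) -> bool:
--     """Check if text contains operators (single pass over characters)."""
--     op_chars = set("+-*/%=<>&|^~!")
--     return any(c in op_chars for c in text)
-- ===== Notes on version B (the rewrite author's own statement) =====
-- stated objective: simpler
-- what changed: Instead of testing 28 operator substrings against the text, B scans the text once and returns True at the first character in the fixed 13-character operator set, which is equivalent because every multi-character operator contains a single-character operator from the set.
import Mathlib
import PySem

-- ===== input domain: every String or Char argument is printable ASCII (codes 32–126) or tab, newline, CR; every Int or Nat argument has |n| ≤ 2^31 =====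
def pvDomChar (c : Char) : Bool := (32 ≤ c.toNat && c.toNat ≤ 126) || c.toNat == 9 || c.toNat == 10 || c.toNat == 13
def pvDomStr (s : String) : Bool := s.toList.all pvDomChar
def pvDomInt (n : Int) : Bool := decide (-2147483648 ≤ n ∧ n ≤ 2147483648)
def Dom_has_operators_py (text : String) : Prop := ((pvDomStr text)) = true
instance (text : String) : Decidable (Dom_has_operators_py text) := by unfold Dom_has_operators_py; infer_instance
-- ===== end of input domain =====

-- B replaces A's 28 substring searches by a single pass over the characters,
-- testing membership in the fixed 13-character operator set (simpler; equivalent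
-- because every multi-character operator contains a single-character one).

-- ===== PORT A =====
-- the Python set literal of 28 distinct operator strings (insertion order)
def pvOpsA : List String :=
  ["+", "-", "*", "/", "%", "=", "==", "!=", "<", ">", "<=", ">=",
   "&&", "||", "!", "&", "|", "^", "~", "<<", ">>", "++", "--",
   "+=", "-=", "*=", "/="]

def has_operators_py (text : String) : Bool :=
  pvOpsA.any (fun op => PySem.Str.isIn op text)

-- ===== PORT B =====
-- op_chars = set("+-*/%=<>&|^~!")
def pvOpChars : PySem.Set Char := PySem.Set.ofList "+-*/%=<>&|^~!".toList

def has_operators_py_alt (text : String) : Bool :=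
  text.toList.any (fun c => PySem.Set.contains pvOpChars c)

-- ===== PRECONDITION & SPEC =====
def Spec_has_operators_py (text : String) (out : Bool) : Prop := out = has_operators_py_alt text
instance (text : String) (out : Bool) : Decidable (Spec_has_operators_py text out) := by unfold Spec_has_operators_py; infer_instance

-- ===== CLAIM (what is proved, stated in full; the proofs are below) =====
def Claim_equal_has_operators_py : Prop := ∀ (text : String), Dom_has_operators_py text → Spec_has_operators_py text (has_operators_py text)

-- ===== LEMMAS AND PROOFS =====

-- every operator string contains a character of the single-character set
lemma pvOps_cover : ∀ op ∈ pvOpsA, ∃ c ∈ op.toList, PySem.Set.contains pvOpChars c = true := by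
  intro op hop
  fin_cases hop <;> simp [pvOpChars]

-- every single character of the set is itself an operator string
lemma pvChars_cover : ∀ c ∈ pvOpChars, ∃ op ∈ pvOpsA, op.toList = [c] := by
  intro c hc
  simp [pvOpChars, PySem.Set.mem_ofList] at hc
  rcases hc with rfl|rfl|rfl|rfl|rfl|rfl|rfl|rfl|rfl|rfl|rfl|rfl|rfl <;> simp [pvOpsA]

lemma pv_main (text : String) : has_operators_py text = has_operators_py_alt text := by
  rw [Bool.eq_iff_iff]
  unfold has_operators_py has_operators_py_alt
  simp only [List.any_eq_true, PySem.Str.isIn_iff_infix]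
  constructor
  · rintro ⟨op, hop, hinf⟩
    obtain ⟨c, hc, hset⟩ := pvOps_cover op hop
    exact ⟨c, hinf.subset hc, hset⟩
  · rintro ⟨c, hc, hset⟩
    have hmem : c ∈ pvOpChars := (PySem.Set.contains_iff _ _).mp hset
    obtain ⟨op, hop, heq⟩ := pvChars_cover c hmem
    obtain ⟨l1, l2, hsplit⟩ := List.append_of_mem hc
    exact ⟨op, hop, heq ▸ ⟨l1, l2, by simp [hsplit]⟩⟩

-- ===== VERDICT (by name: the statement is the Claim_ definition above) =====
theorem has_operators_py_spec : Claim_equal_has_operators_py := by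
  intro text _
  unfold Spec_has_operators_py
  exact pv_main text
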